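-- pv_equiv track=rewrite | github.com/cjmcmurtrie/timetext | timetext/utils.py | chunkdelimiters
-- ===== SOURCE A (Python) =====
-- def chunkdelimiters(iterable, delimiters):
--     result = []
--     group = []
--     if iterable:
--         for e in iterable:
--             if e not in delimiters:
--                 group.append(e)
--             else:
--                 if group:
--                     result.append(tuple(group))
--                 group = []
--         result.append(tuple(group))
--     return result
-- ===== SOURCE B (Python) =====
-- def chunkdelimiters(iterable, delimiters):
--     if not iterable:
--         return []
--     seq = list(iterable)
--     positions = [i for i, e in enumerate(seq) if e in delimiters]
--     result = []
--     start = 0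
--     for p in positions:
--         if start < p:
--             result.append(tuple(seq[start:p]))
--         start = p + 1
--     result.append(tuple(seq[start:]))
--     return result
-- ===== Notes on version B (the rewrite author's own statement) =====
-- stated objective: alternative
-- what changed: Instead of accumulating a running group element-by-element, B precomputes the list of delimiter positions and slices the segments between consecutive positions out of the sequence.
import Mathlib
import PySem

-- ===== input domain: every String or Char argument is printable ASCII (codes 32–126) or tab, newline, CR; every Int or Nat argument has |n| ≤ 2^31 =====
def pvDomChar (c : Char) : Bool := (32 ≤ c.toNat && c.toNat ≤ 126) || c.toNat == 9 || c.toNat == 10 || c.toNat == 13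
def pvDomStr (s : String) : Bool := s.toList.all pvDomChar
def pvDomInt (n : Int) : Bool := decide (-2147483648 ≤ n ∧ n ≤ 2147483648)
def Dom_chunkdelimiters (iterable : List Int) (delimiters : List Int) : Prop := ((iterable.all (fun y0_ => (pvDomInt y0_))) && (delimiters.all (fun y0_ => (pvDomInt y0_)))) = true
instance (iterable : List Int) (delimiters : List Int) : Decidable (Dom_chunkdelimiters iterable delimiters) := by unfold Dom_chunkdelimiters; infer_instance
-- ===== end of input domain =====

-- B slices the segments between precomputed delimiter positions instead of accumulating a
-- running group element-by-element (objective: alternative decomposition, same cost).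

-- ===== PORT A =====
-- A: one pass, accumulating (result, group); appends group on each delimiter if nonempty,
-- and appends the final group unconditionally (only when the input list is nonempty).
def stepA (delimiters : List Int) (st : List (List Int) × List Int) (e : Int) :
    List (List Int) × List Int :=
  if ¬ delimiters.contains e then (st.1, st.2 ++ [e])
  else ((if st.2 ≠ [] then st.1 ++ [st.2] else st.1), [])

def chunkdelimiters (iterable : List Int) (delimiters : List Int) : List (List Int) :=
  match iterable with
  | [] => []
  | _ :: _ =>
    let st := iterable.foldl (stepA delimiters) ([], [])
    st.1 ++ [st.2]

-- ===== PORT B =====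
-- B: positions = [i for i,e in enumerate(seq) if e in delimiters]; then walk positions with
-- a start cursor, slicing seq[start:p] when start < p; finally append seq[start:].
def stepB (seq : List Int) (st : List (List Int) × Int) (p : Int) :
    List (List Int) × Int :=
  ((if st.2 < p then st.1 ++ [PySem.List.slice seq (some st.2) (some p)] else st.1), p + 1)

def chunkdelimiters_alt (iterable : List Int) (delimiters : List Int) : List (List Int) :=
  match iterable with
  | [] => []
  | _ :: _ =>
    let seq := iterable
    let positions := ((PySem.List.enumerate seq 0).filter
      (fun p => delimiters.contains p.2)).map (·.1)
    let st := positions.foldl (stepB seq) ([], (0 : Int))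
    st.1 ++ [PySem.List.slice seq (some st.2) none]

-- ===== PRECONDITION & SPEC =====
def Spec_chunkdelimiters (iterable : List Int) (delimiters : List Int) (out : List (List Int)) : Prop := out = chunkdelimiters_alt iterable delimiters
instance (iterable : List Int) (delimiters : List Int) (out : List (List Int)) : Decidable (Spec_chunkdelimiters iterable delimiters out) := by unfold Spec_chunkdelimiters; infer_instance

-- ===== CLAIM =====
def Claim_equal_chunkdelimiters : Prop := ∀ (iterable : List Int) (delimiters : List Int), Dom_chunkdelimiters iterable delimiters → Spec_chunkdelimiters iterable delimiters (chunkdelimiters iterable delimiters)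

-- ===== LEMMAS AND PROOFS =====

-- canonical recursive spec both ports are reduced to
def chunksSpec (ds : List Int) (xs : List Int) (g : List Int) : List (List Int) :=
  match xs with
  | [] => [g]
  | e :: xt =>
    if ds.contains e then (if g ≠ [] then [g] else []) ++ chunksSpec ds xt []
    else chunksSpec ds xt (g ++ [e])

-- delimiter positions of xs, relative (Int-valued, as Python's enumerate indices)
def posSpec (ds : List Int) : List Int → List Int
  | [] => []
  | e :: xt => (if ds.contains e then [(0 : Int)] else []) ++ (posSpec ds xt).map (· + 1)

-- recursive form of B's fold
def tailRel (seq : List Int) : List Int → Int → List (List Int)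
  | [], start => [PySem.List.slice seq (some start) none]
  | p :: ps, start =>
    (if start < p then [PySem.List.slice seq (some start) (some p)] else [])
      ++ tailRel seq ps (p + 1)

theorem foldA_eq (ds : List Int) : ∀ (xs : List Int) (res : List (List Int)) (g : List Int),
    (xs.foldl (stepA ds) (res, g)).1 ++ [(xs.foldl (stepA ds) (res, g)).2]
      = res ++ chunksSpec ds xs g := by
  intro xs
  induction xs with
  | nil => intro res g; simp [chunksSpec]
  | cons e xt ih =>
    intro res g
    rw [List.foldl_cons]
    by_cases hc : ds.contains e
    · have hm : e ∈ ds := by simpa using hc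
      rw [show stepA ds (res, g) e = ((if g ≠ [] then res ++ [g] else res), []) from by
        simp [stepA, hm]]
      by_cases hg : g = []
      · rw [if_neg (by simpa using hg), ih]
        simp [chunksSpec, hm, hg]
      · rw [if_pos (by simpa using hg), ih]
        simp [chunksSpec, hm, hg, List.append_assoc]
    · have hm : e ∉ ds := by simpa using hc
      rw [show stepA ds (res, g) e = (res, g ++ [e]) from by simp [stepA, hm], ih]
      simp [chunksSpec, hm]

theorem foldB_eq (seq : List Int) : ∀ (ps : List Int) (res : List (List Int)) (start : Int),
    (ps.foldl (stepB seq) (res, start)).1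
        ++ [PySem.List.slice seq (some (ps.foldl (stepB seq) (res, start)).2) none]
      = res ++ tailRel seq ps start := by
  intro ps
  induction ps with
  | nil => intro res start; simp [tailRel]
  | cons p pt ih =>
    intro res start
    rw [List.foldl_cons]
    by_cases h : start < p
    · rw [show stepB seq (res, start) p
          = (res ++ [PySem.List.slice seq (some start) (some p)], p + 1) from by
        simp [stepB, h], ih]
      simp [tailRel, h]
    · rw [show stepB seq (res, start) p = (res, p + 1) from by simp [stepB, h], ih]
      simp [tailRel, h]

theorem pos_enum (ds : List Int) : ∀ (xs : List Int) (s : Int),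
    ((PySem.List.enumerate xs s).filter (fun p => ds.contains p.2)).map (·.1)
      = (posSpec ds xs).map (· + s) := by
  intro xs
  induction xs with
  | nil => intro s; simp [PySem.List.enumerate_nil, posSpec]
  | cons e xt ih =>
    intro s
    rw [PySem.List.enumerate_cons]
    by_cases hc : ds.contains e
    · rw [List.filter_cons_of_pos
        (l := PySem.List.enumerate xt (s + 1)) (p := fun p => ds.contains p.2)
        (a := (s, e)) (by simpa using hc),
        show posSpec ds (e :: xt) = (0 : Int) :: (posSpec ds xt).map (· + 1) from by
          simp [posSpec, show e ∈ ds from by simpa using hc],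
        List.map_cons, List.map_cons, ih (s + 1), List.map_map]
      congr 1
      · ring
      · apply List.map_congr_left
        intro a _
        simp [Function.comp]
        ring
    · rw [List.filter_cons_of_neg
        (l := PySem.List.enumerate xt (s + 1)) (p := fun p => ds.contains p.2)
        (a := (s, e)) (by simpa using hc),
        show posSpec ds (e :: xt) = (posSpec ds xt).map (· + 1) from by
          simp [posSpec, show e ∉ ds from by simpa using hc],
        ih (s + 1), List.map_map]
      apply List.map_congr_left
      intro a _
      simp [Function.comp]
      ring

theorem tailRel_main (ds : List Int) : ∀ (xs seq : List Int) (n m : Nat),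
    m ≤ n → seq.drop n = xs →
    tailRel seq ((posSpec ds xs).map (· + (n : Int))) (m : Int)
      = chunksSpec ds xs ((seq.drop m).take (n - m)) := by
  intro xs
  induction xs with
  | nil =>
    intro seq n m hmn hdrop
    have hlen : seq.length ≤ n := List.drop_eq_nil_iff.mp hdrop
    simp only [posSpec, List.map_nil, tailRel, chunksSpec]
    rw [PySem.List.slice_from_natCast]
    congr 1
    rw [List.take_of_length_le (by simp; omega)]
  | cons e xt ih =>
    intro seq n m hmn hdrop
    have hn : n < seq.length := by
      rcases Nat.lt_or_ge n seq.length with h | h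
      · exact h
      · rw [List.drop_eq_nil_iff.mpr h] at hdrop; simp at hdrop
    have hgete : seq[n]? = some e := by
      have h0 := congrArg (fun l => l[0]?) hdrop
      simpa [List.getElem?_drop] using h0
    have hdrop1 : seq.drop (n + 1) = xt := by
      rw [← List.drop_drop, hdrop]; simp
    have hcast : ((n : Int) + 1) = (((n + 1 : Nat) : Int)) := by push_cast; ring
    have hmap : ((posSpec ds xt).map (· + 1)).map (· + (n : Int))
        = (posSpec ds xt).map (· + ((n + 1 : Nat) : Int)) := by
      rw [List.map_map]
      apply List.map_congr_left
      intro a _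
      simp [Function.comp]
      ring
    by_cases hc : ds.contains e
    · simp only [posSpec, if_pos hc, List.cons_append, List.nil_append, List.map_cons,
        tailRel, chunksSpec]
      rw [show ((0 : Int) + (n : Int)) = (n : Int) by ring, hmap, hcast,
        ih seq (n + 1) (n + 1) le_rfl hdrop1]
      simp only [Nat.sub_self, List.take_zero]
      congr 1
      by_cases hlt : m < n
      · rw [if_pos (by exact_mod_cast hlt), if_pos (by
          simp only [ne_eq, List.take_eq_nil_iff, not_or]
          refine ⟨by omega, ?_⟩
          intro h
          rw [List.drop_eq_nil_iff] at h
          omega)]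
        rw [PySem.List.slice_natCast]
      · rw [if_neg (by exact_mod_cast hlt), if_neg (by
          simp only [ne_eq, not_not]
          have h0 : n - m = 0 := by omega
          simp [h0])]
    · simp only [posSpec, if_neg hc, List.nil_append, chunksSpec]
      rw [hmap, ih seq (n + 1) m (by omega) hdrop1]
      congr 1
      have hidx : n - m < (seq.drop m).length := by simp; omega
      have hsub : n + 1 - m = (n - m) + 1 := by omega
      rw [hsub, List.take_add_one, List.getElem?_drop,
        show m + (n - m) = n by omega, hgete]
      simp

-- ===== VERDICT =====
theorem chunkdelimiters_spec : Claim_equal_chunkdelimiters := by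
  intro iterable delimiters _
  unfold Spec_chunkdelimiters chunkdelimiters chunkdelimiters_alt
  match iterable with
  | [] => rfl
  | x :: xs =>
    simp only
    rw [foldA_eq delimiters (x :: xs) [] []]
    rw [pos_enum delimiters (x :: xs) 0]
    rw [foldB_eq (x :: xs) _ [] 0]
    have hmain := tailRel_main delimiters (x :: xs) (x :: xs) 0 0 le_rfl (by simp)
    simp only [Nat.cast_zero, Nat.sub_self, List.take_zero, List.drop_zero] at hmain
    rw [hmain]
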